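-- pv_equiv track=rewrite | github.com/Amrmohamed090/CodeCloneClassification | siameseCC/data_loader/BigCloneBenchDataset.py | build_cloneGroups
-- ===== SOURCE A (Python) =====
-- def build_cloneGroups(clone_pairs):
--     """
--     Build groups of transitively related clones.
--     Returns a dictionary mapping function_id to group_id.
--     """
--     group_ids = {}  # key = function_id, value = group_id
--     group_sizes = {}
--     i = 0
--
--     # First pass: assign initial groups
--     for func_id_one, func_id_two , _ in clone_pairs:
--
--         if func_id_one not in group_ids and func_id_two not in group_ids:
--             group_ids[func_id_one] = i
--             group_ids[func_id_two] = i
--             group_sizes[i] = 2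
--             i += 1
--
--         elif func_id_one in group_ids and func_id_two not in group_ids:
--             group_ids[func_id_two] = group_ids[func_id_one]
--             group_sizes[group_ids[func_id_two]] +=1
--
--         elif func_id_one not in group_ids and func_id_two in group_ids:
--             group_ids[func_id_one] = group_ids[func_id_two]
--             group_sizes[group_ids[func_id_two]] +=1
--
--         elif func_id_one in group_ids and func_id_two in group_ids and not group_ids[func_id_one] == group_ids[func_id_two]:
--             # Both are in groups - need to merge groups
--             old_group_id = group_ids[func_id_two]
--             new_group_id = group_ids[func_id_one]
--
--             group_sizes[new_group_id] += group_sizes[old_group_id]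
--             # Update all functions in the old group to be in the new group
--             for func_id, group in group_ids.items():
--                 if group == old_group_id:
--                     group_ids[func_id] = new_group_id
--
--     return group_ids, group_sizes
-- ===== SOURCE B (Python) =====
-- def build_cloneGroups(clone_pairs):
--     """
--     Build groups of transitively related clones.
--     Returns a dictionary mapping function_id to group_id.
--     Union-find on group ids: a merge links the absorbed group's root under the
--     surviving group id instead of rewriting every member's entry.
--     """
--     parent = {}   # group_id -> group_id (union-find forest over group ids)
--     label = {}    # function_id -> provisional group id (first-seen order)
--     group_sizes = {}
--     i = 0
--
--     def find(g):
--         while parent[g] != g: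
--             g = parent[g]
--         return g
--
--     for func_id_one, func_id_two, _ in clone_pairs:
--         if func_id_one not in label and func_id_two not in label:
--             label[func_id_one] = i
--             label[func_id_two] = i
--             parent[i] = i
--             group_sizes[i] = 2
--             i += 1
--         elif func_id_two not in label:
--             g = find(label[func_id_one])
--             label[func_id_two] = g
--             group_sizes[g] += 1
--         elif func_id_one not in label:
--             g = find(label[func_id_two])
--             label[func_id_one] = g
--             group_sizes[g] += 1
--         else:
--             ga = find(label[func_id_one])
--             gb = find(label[func_id_two])
--             if ga != gb:
--                 parent[gb] = ga
--                 group_sizes[ga] += group_sizes[gb]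
--
--     return {f: find(g) for f, g in label.items()}, group_sizes
-- ===== Notes on version B (the rewrite author's own statement) =====
-- stated objective: alternative
-- what changed: Replaces A's eager merge (rewriting every function's group entry on each union, O(#functions) per merge) by a union-find forest over group ids: a merge links the absorbed group's root under the surviving group id and each function's provisional label is resolved through the forest, with a final resolution pass producing the dictionary.
import Mathlib
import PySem

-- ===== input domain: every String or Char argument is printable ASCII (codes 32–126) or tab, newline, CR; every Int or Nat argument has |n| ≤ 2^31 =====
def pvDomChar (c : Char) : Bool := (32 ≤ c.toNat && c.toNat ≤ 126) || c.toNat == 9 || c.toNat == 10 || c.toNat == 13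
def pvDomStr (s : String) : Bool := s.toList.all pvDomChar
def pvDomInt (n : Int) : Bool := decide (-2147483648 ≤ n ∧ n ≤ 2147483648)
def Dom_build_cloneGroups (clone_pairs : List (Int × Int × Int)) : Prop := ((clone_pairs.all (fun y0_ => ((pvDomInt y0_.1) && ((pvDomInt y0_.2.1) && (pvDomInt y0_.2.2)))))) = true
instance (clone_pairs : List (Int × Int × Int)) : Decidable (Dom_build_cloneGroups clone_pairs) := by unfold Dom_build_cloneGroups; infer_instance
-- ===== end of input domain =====

-- B replaces A's eager merge (which rewrites every function's group entry on each union)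
-- by a union-find forest over group ids with a final resolution pass; same return value.

-- ===== PORT A =====
-- loop body of A's first pass; state = (group_ids, group_sizes, i)
def pvStepA (st : PySem.Dict Int Int × PySem.Dict Int Int × Int) (p : Int × Int × Int) :
    PySem.Dict Int Int × PySem.Dict Int Int × Int :=
  let G := st.1; let S := st.2.1; let i := st.2.2
  let a := p.1; let b := p.2.1
  if G.contains a = false ∧ G.contains b = false then
    ((G.insert a i).insert b i, S.insert i 2, i + 1)
  else if G.contains a = true ∧ G.contains b = false then
    -- group_ids[func_id_one] / group_sizes[...] : both keys are present in this branch,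
    -- so getD 0 / modify with default 0 are exact (no KeyError path is reachable)
    let v := G.getD a 0
    (G.insert b v, S.modify v 0 (· + 1), i)
  else if G.contains a = false ∧ G.contains b = true then
    let v := G.getD b 0
    (G.insert a v, S.modify v 0 (· + 1), i)
  else if G.contains a = true ∧ G.contains b = true ∧ ¬ (G.getD a 0 = G.getD b 0) then
    let old := G.getD b 0
    let nw := G.getD a 0
    -- Python's "for func_id, group in group_ids.items(): if group == old: group_ids[func_id] = new"
    -- only overwrites values at existing keys, i.e. rebuilds the same-ordered items list:
    (PySem.Dict.mk (G.items.map (fun q => if q.2 = old then (q.1, nw) else q)),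
     S.modify nw 0 (· + S.getD old 0), i)
  else (G, S, i)

def build_cloneGroups (clone_pairs : List (Int × Int × Int)) : (List (Int × Int)) × (List (Int × Int)) :=
  let st := clone_pairs.foldl pvStepA (PySem.Dict.empty, PySem.Dict.empty, 0)
  (st.1.items, st.2.1.items)

-- ===== PORT B =====
-- B's find: "while parent[g] != g: g = parent[g]".  Every g it is ever called on is a key of
-- parent (label values and parent entries all lie in the forest), so getD g g is exact there;
-- fuel = parent.size bounds the walk because the chains are acyclic and stay inside the keys.
def pvFind (P : PySem.Dict Int Int) : Nat → Int → Int
  | 0, g => g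
  | fuel + 1, g => if P.getD g g = g then g else pvFind P fuel (P.getD g g)

-- loop body of B's pass; state = (parent, label, group_sizes, i)
def pvStepB (st : PySem.Dict Int Int × PySem.Dict Int Int × PySem.Dict Int Int × Int)
    (p : Int × Int × Int) :
    PySem.Dict Int Int × PySem.Dict Int Int × PySem.Dict Int Int × Int :=
  let P := st.1; let L := st.2.1; let S := st.2.2.1; let i := st.2.2.2
  let a := p.1; let b := p.2.1
  if L.contains a = false ∧ L.contains b = false then
    (P.insert i i, (L.insert a i).insert b i, S.insert i 2, i + 1)
  else if L.contains b = false then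
    let g := pvFind P P.size (L.getD a 0)
    (P, L.insert b g, S.modify g 0 (· + 1), i)
  else if L.contains a = false then
    let g := pvFind P P.size (L.getD b 0)
    (P, L.insert a g, S.modify g 0 (· + 1), i)
  else
    let ga := pvFind P P.size (L.getD a 0)
    let gb := pvFind P P.size (L.getD b 0)
    if ga = gb then (P, L, S, i)
    else (P.insert gb ga, L, S.modify ga 0 (· + S.getD gb 0), i)

def build_cloneGroups_alt (clone_pairs : List (Int × Int × Int)) : (List (Int × Int)) × (List (Int × Int)) :=
  let st := clone_pairs.foldl pvStepB (PySem.Dict.empty, PySem.Dict.empty, PySem.Dict.empty, 0)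
  (st.2.1.items.map (fun q => (q.1, pvFind st.1 st.1.size q.2)), st.2.2.1.items)

-- ===== PRECONDITION & SPEC =====
def Spec_build_cloneGroups (clone_pairs : List (Int × Int × Int)) (out : (List (Int × Int)) × (List (Int × Int))) : Prop := out = build_cloneGroups_alt clone_pairs
instance (clone_pairs : List (Int × Int × Int)) (out : (List (Int × Int)) × (List (Int × Int))) : Decidable (Spec_build_cloneGroups clone_pairs out) := by unfold Spec_build_cloneGroups; infer_instance

-- ===== CLAIM (what is proved, stated in full; the proofs are below) =====
def Claim_equal_build_cloneGroups : Prop := ∀ (clone_pairs : List (Int × Int × Int)), Dom_build_cloneGroups clone_pairs → Spec_build_cloneGroups clone_pairs (build_cloneGroups clone_pairs)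

-- ===== LEMMAS AND PROOFS =====

-- g is a root of the forest P
def pvRoot (P : PySem.Dict Int Int) (g : Int) : Prop := P.getD g g = g

-- the chain g, parent g, parent (parent g), … after n steps
def pvIterN (P : PySem.Dict Int Int) : Nat → Int → Int
  | 0, g => g
  | n + 1, g => pvIterN P n (P.getD g g)

-- the keys 0, 1, …, i-1 in insertion order
def pvKeysOf (i : Int) : List Int := (List.range i.toNat).map (fun n : Nat => (n : Int))

-- the simulation invariant between A's state (G, S, i) and B's state (P, L, S', i')
def pvInv (stA : PySem.Dict Int Int × PySem.Dict Int Int × Int)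
    (stB : PySem.Dict Int Int × PySem.Dict Int Int × PySem.Dict Int Int × Int) : Prop :=
  stB.2.2.2 = stA.2.2 ∧ stB.2.2.1 = stA.2.1 ∧ 0 ≤ stA.2.2 ∧
  stB.1.keys = pvKeysOf stA.2.2 ∧
  (∀ g, 0 ≤ g → g < stA.2.2 →
      (0 ≤ stB.1.getD g g ∧ stB.1.getD g g < stA.2.2) ∧
      ∃ n, n < stA.2.2.toNat ∧ pvRoot stB.1 (pvIterN stB.1 n g)) ∧
  (∀ q ∈ stB.2.1.items, 0 ≤ q.2 ∧ q.2 < stA.2.2) ∧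
  stB.2.1.keys.Nodup ∧
  stA.1.items = stB.2.1.items.map (fun q => (q.1, pvFind stB.1 stB.1.size q.2))

lemma pvIterN_succ_right (P : PySem.Dict Int Int) (n : Nat) (g : Int) :
    pvIterN P (n + 1) g = P.getD (pvIterN P n g) (pvIterN P n g) := by
  induction n generalizing g with
  | zero => rfl
  | succ m ih => exact ih (P.getD g g)

lemma pvIterN_of_root (P : PySem.Dict Int Int) (n : Nat) (g : Int) (h : pvRoot P g) :
    pvIterN P n g = g := by
  induction n with
  | zero => rfl
  | succ m ih => rw [pvIterN_succ_right, ih, h]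

lemma pvFind_of_root (P : PySem.Dict Int Int) (fuel : Nat) (g : Int) (h : pvRoot P g) :
    pvFind P fuel g = g := by
  unfold pvRoot at h
  cases fuel with
  | zero => rfl
  | succ m => simp [pvFind, h]

lemma pvFind_eq_of_reach (P : PySem.Dict Int Int) (n fuel : Nat) (g r : Int)
    (h1 : pvIterN P n g = r) (h2 : pvRoot P r) (h3 : n ≤ fuel) :
    pvFind P fuel g = r := by
  induction n generalizing g fuel with
  | zero =>
    have hg : g = r := h1
    subst hg
    exact pvFind_of_root P fuel g h2
  | succ m ih =>
    cases fuel with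
    | zero => omega
    | succ f =>
      by_cases hg : P.getD g g = g
      · have hgr : pvIterN P (m + 1) g = g := pvIterN_of_root P (m + 1) g hg
        have hr : r = g := by rw [← h1, hgr]
        simp [pvFind, hg, hr]
      · have h1' : pvIterN P m (P.getD g g) = r := h1
        have := ih f (P.getD g g) h1' (by omega)
        simp [pvFind, hg, this]

-- periodicity of the chain
lemma pvIterN_period (P : PySem.Dict Int Int) (j k : Nat) (g : Int)
    (h : pvIterN P j g = pvIterN P k g) :
    ∀ t, pvIterN P (j + t) g = pvIterN P (k + t) g := by
  intro t
  induction t with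
  | zero => simpa using h
  | succ s ih =>
    rw [← Nat.add_assoc, ← Nat.add_assoc, pvIterN_succ_right, pvIterN_succ_right, ih]

lemma pv_nodup_length_le (l : List Int) (i : Int) (hn : l.Nodup)
    (hb : ∀ x ∈ l, 0 ≤ x ∧ x < i) : l.length ≤ i.toNat := by
  have hsub : l.toFinset ⊆ Finset.Ico (0 : Int) i := by
    intro x hx
    rw [List.mem_toFinset] at hx
    have := hb x hx
    rw [Finset.mem_Ico]
    exact this
  have hcard := Finset.card_le_card hsub
  rw [List.toFinset_card_of_nodup hn, Int.card_Ico] at hcard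
  simpa using hcard

-- membership characterisation of pvKeysOf
lemma pv_mem_keysOf (i g : Int) (hi0 : 0 ≤ i) : g ∈ pvKeysOf i ↔ 0 ≤ g ∧ g < i := by
  unfold pvKeysOf
  rw [List.mem_map]
  constructor
  · rintro ⟨n, hn, rfl⟩
    rw [List.mem_range] at hn
    omega
  · intro hb
    refine ⟨g.toNat, ?_, by omega⟩
    rw [List.mem_range]
    omega

lemma pv_size_of_keys (P : PySem.Dict Int Int) (i : Int) (h : P.keys = pvKeysOf i) :
    P.size = i.toNat := by
  have := congrArg List.length h
  simpa [PySem.Dict.keys, PySem.Dict.size, pvKeysOf] using this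

-- chain stays inside [0, i)
lemma pvIterN_mem (P : PySem.Dict Int Int) (i : Int)
    (hcl : ∀ x, 0 ≤ x → x < i → 0 ≤ P.getD x x ∧ P.getD x x < i)
    (n : Nat) (g : Int) (hg : 0 ≤ g ∧ g < i) :
    0 ≤ pvIterN P n g ∧ pvIterN P n g < i := by
  induction n with
  | zero => exact hg
  | succ m ih => rw [pvIterN_succ_right]; exact hcl _ ih.1 ih.2

-- the first n₀ steps of the chain are unchanged after linking the root rb
lemma pvIterN_insert_pres (P : PySem.Dict Int Int) (rb ra g : Int) (n₀ : Nat)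
    (hmin : ∀ k < n₀, ¬ pvRoot P (pvIterN P k g)) (hrb : pvRoot P rb) :
    ∀ k ≤ n₀, pvIterN (P.insert rb ra) k g = pvIterN P k g := by
  intro k hk
  induction k with
  | zero => rfl
  | succ j ih =>
    have hj : j ≤ n₀ := by omega
    rw [pvIterN_succ_right, pvIterN_succ_right, ih hj]
    have hne : pvIterN P j g ≠ rb := by
      intro he
      exact hmin j (by omega) (by rw [he]; exact hrb)
    rw [PySem.Dict.getD_insert]
    simp [hne]

-- adding a fresh key does not change chains through [0, i)
lemma pvIterN_insert_fresh (P : PySem.Dict Int Int) (i g : Int) (n : Nat)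
    (hcl : ∀ x, 0 ≤ x → x < i → 0 ≤ P.getD x x ∧ P.getD x x < i)
    (hg : 0 ≤ g ∧ g < i) :
    pvIterN (P.insert i i) n g = pvIterN P n g := by
  induction n with
  | zero => rfl
  | succ m ih =>
    rw [pvIterN_succ_right, pvIterN_succ_right, ih]
    have hm := pvIterN_mem P i hcl m g hg
    have hne : pvIterN P m g ≠ i := by omega
    rw [PySem.Dict.getD_insert]
    simp [hne]

-- least index at which the chain from v hits a root
lemma pv_least_root (P : PySem.Dict Int Int) (v : Int)
    (h : ∃ n, pvRoot P (pvIterN P n v)) :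
    ∃ n₀, pvRoot P (pvIterN P n₀ v) ∧ (∀ k < n₀, ¬ pvRoot P (pvIterN P k v)) ∧
      ∀ m, pvRoot P (pvIterN P m v) → n₀ ≤ m := by
  haveI : DecidablePred fun n => pvRoot P (pvIterN P n v) := fun n => by
    unfold pvRoot; infer_instance
  exact ⟨Nat.find h, Nat.find_spec h, fun k hk => Nat.find_min h hk,
    fun m hm => Nat.find_min' h hm⟩

-- a minimal chain has pairwise distinct elements
lemma pv_chain_inj (P : PySem.Dict Int Int) (v : Int) (n₀ : Nat)
    (hmin : ∀ k < n₀, ¬ pvRoot P (pvIterN P k v))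
    (hroot : pvRoot P (pvIterN P n₀ v)) :
    ∀ j k, j ≤ n₀ → k ≤ n₀ → pvIterN P j v = pvIterN P k v → j = k := by
  have aux : ∀ j k, j < k → k ≤ n₀ → pvIterN P j v ≠ pvIterN P k v := by
    intro j k hjk hk heq
    have hper := pvIterN_period P j k v heq (n₀ - k)
    have h2 : k + (n₀ - k) = n₀ := by omega
    rw [h2] at hper
    have h3 : j + (n₀ - k) < n₀ := by omega
    exact hmin _ h3 (by rw [hper]; exact hroot)
  intro j k hj hk heq
  rcases lt_trichotomy j k with h | h | h
  · exact absurd heq (aux j k h hk)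
  · exact h
  · exact absurd heq.symm (aux k j h hj)

-- effect of a union (linking root gb under root ga) on chains and on resolution
lemma pv_merge_find (P : PySem.Dict Int Int) (i ga gb : Int)
    (hcl : ∀ x, 0 ≤ x → x < i → 0 ≤ P.getD x x ∧ P.getD x x < i)
    (hreach : ∀ x, 0 ≤ x → x < i → ∃ n, n < i.toNat ∧ pvRoot P (pvIterN P n x))
    (hga : pvRoot P ga) (hgb : pvRoot P gb) (hne : ga ≠ gb)
    (hgai : 0 ≤ ga ∧ ga < i)
    (v : Int) (hv0 : 0 ≤ v) (hv1 : v < i) :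
    (∃ n, n < i.toNat ∧ pvRoot (P.insert gb ga) (pvIterN (P.insert gb ga) n v)) ∧
    pvFind (P.insert gb ga) i.toNat v =
      (if pvFind P i.toNat v = gb then ga else pvFind P i.toNat v) := by
  obtain ⟨n, hn, hr⟩ := hreach v hv0 hv1
  obtain ⟨n₀, hr0, hmin, hle⟩ := pv_least_root P v ⟨n, hr⟩
  have hn₀ : n₀ < i.toNat := lt_of_le_of_lt (hle n hr) hn
  have hfindP : pvFind P i.toNat v = pvIterN P n₀ v :=
    pvFind_eq_of_reach P n₀ i.toNat v _ rfl hr0 (by omega)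
  have hpres := pvIterN_insert_pres P gb ga v n₀ hmin hgb
  have hrmem : 0 ≤ pvIterN P n₀ v ∧ pvIterN P n₀ v < i :=
    pvIterN_mem P i hcl n₀ v ⟨hv0, hv1⟩
  by_cases hreq : pvIterN P n₀ v = gb
  · -- pigeonhole: the distinct chain elements plus ga give n₀ + 2 ≤ i.toNat
    have hinj := pv_chain_inj P v n₀ hmin hr0
    have h1 : ((List.range (n₀ + 1)).map (fun k => pvIterN P k v)).Nodup := by
      refine List.Nodup.map_on ?_ (List.nodup_range)
      intro x hx y hy hxy
      rw [List.mem_range] at hx hy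
      exact hinj x y (by omega) (by omega) hxy
    have h2 : ∀ x ∈ (List.range (n₀ + 1)).map (fun k => pvIterN P k v), x ≠ ga := by
      intro x hx
      simp only [List.mem_map, List.mem_range] at hx
      obtain ⟨k, hk, rfl⟩ := hx
      intro hxeq
      by_cases hkn : k = n₀
      · subst hkn
        rw [hreq] at hxeq
        exact hne hxeq.symm
      · exact hmin k (by omega) (by rw [hxeq]; exact hga)
    have hnodup : (((List.range (n₀ + 1)).map (fun k => pvIterN P k v)) ++ [ga]).Nodup := by
      rw [List.nodup_append]
      refine ⟨h1, List.nodup_singleton _, ?_⟩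
      intro x hx y hy
      rw [List.mem_singleton] at hy
      subst hy
      exact h2 x hx
    have hbound : ∀ x ∈ ((List.range (n₀ + 1)).map (fun k => pvIterN P k v)) ++ [ga],
        0 ≤ x ∧ x < i := by
      intro x hx
      rw [List.mem_append] at hx
      rcases hx with hx | hx
      · simp only [List.mem_map, List.mem_range] at hx
        obtain ⟨k, hk, rfl⟩ := hx
        exact pvIterN_mem P i hcl k v ⟨hv0, hv1⟩
      · rw [List.mem_singleton] at hx
        subst hx
        exact hgai
    have hlen := pv_nodup_length_le _ i hnodup hbound
    have hlenlist : (((List.range (n₀ + 1)).map (fun k => pvIterN P k v)) ++ [ga]).length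
        = n₀ + 2 := by
      simp
    rw [hlenlist] at hlen
    have hlen2 : n₀ + 2 ≤ i.toNat := hlen
    have hstep : pvIterN (P.insert gb ga) (n₀ + 1) v = ga := by
      rw [pvIterN_succ_right, hpres n₀ le_rfl, hreq, PySem.Dict.getD_insert_self]
    have hroot' : pvRoot (P.insert gb ga) ga := by
      unfold pvRoot
      rw [PySem.Dict.getD_insert]
      simp only [hne, if_false]
      exact hga
    refine ⟨⟨n₀ + 1, by omega, by rw [hstep]; exact hroot'⟩, ?_⟩
    rw [hfindP, if_pos hreq]
    exact pvFind_eq_of_reach _ (n₀ + 1) i.toNat v ga hstep hroot' (by omega)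
  · have hiter' : pvIterN (P.insert gb ga) n₀ v = pvIterN P n₀ v := hpres n₀ le_rfl
    have hroot' : pvRoot (P.insert gb ga) (pvIterN P n₀ v) := by
      unfold pvRoot
      rw [PySem.Dict.getD_insert]
      simp only [hreq, if_false]
      exact hr0
    refine ⟨⟨n₀, by omega, by rw [hiter']; exact hroot'⟩, ?_⟩
    rw [hfindP, if_neg hreq]
    exact pvFind_eq_of_reach _ n₀ i.toNat v _ hiter' hroot' (by omega)

-- effect of registering a fresh group id i on chains and on resolution
lemma pv_fresh_find (P : PySem.Dict Int Int) (i : Int)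
    (hcl : ∀ x, 0 ≤ x → x < i → 0 ≤ P.getD x x ∧ P.getD x x < i)
    (hreach : ∀ x, 0 ≤ x → x < i → ∃ n, n < i.toNat ∧ pvRoot P (pvIterN P n x))
    (v : Int) (hv0 : 0 ≤ v) (hv1 : v < i) :
    (∃ n, n < (i + 1).toNat ∧ pvRoot (P.insert i i) (pvIterN (P.insert i i) n v)) ∧
    pvFind (P.insert i i) (i.toNat + 1) v = pvFind P i.toNat v := by
  obtain ⟨n, hn, hr⟩ := hreach v hv0 hv1
  have hfresh := pvIterN_insert_fresh P i v n hcl ⟨hv0, hv1⟩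
  have hrm : 0 ≤ pvIterN P n v ∧ pvIterN P n v < i := pvIterN_mem P i hcl n v ⟨hv0, hv1⟩
  have hroot' : pvRoot (P.insert i i) (pvIterN P n v) := by
    unfold pvRoot
    rw [PySem.Dict.getD_insert]
    simp only [show pvIterN P n v ≠ i by omega, if_false]
    exact hr
  refine ⟨⟨n, by omega, by rw [hfresh]; exact hroot'⟩, ?_⟩
  rw [pvFind_eq_of_reach (P.insert i i) n (i.toNat + 1) v _ hfresh hroot' (by omega),
    pvFind_eq_of_reach P n i.toNat v _ rfl hr (by omega)]

-- insert at matching keys commutes with the value-resolution map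
lemma pv_items_map_insert (G L : PySem.Dict Int Int) (F : Int → Int) (k v w : Int)
    (h : G.items = L.items.map (fun q => (q.1, F q.2))) (hv : w = F v) :
    (G.insert k w).items = ((L.insert k v).items).map (fun q => (q.1, F q.2)) := by
  have hGkeys : G.keys = L.keys := by
    simp only [PySem.Dict.keys, h, List.map_map]
    exact List.map_congr_left (fun q _ => rfl)
  have hc : G.contains k = L.contains k := by
    rw [PySem.Dict.contains_eq_decide_mem_keys, PySem.Dict.contains_eq_decide_mem_keys, hGkeys]
  cases hck : L.contains k with
  | false =>
    rw [PySem.Dict.items_insert_of_not_contains G w (by rw [hc]; exact hck),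
      PySem.Dict.items_insert_of_not_contains L v hck, h, List.map_append]
    simp [hv]
  | true =>
    rw [PySem.Dict.items_insert_of_contains G w (by rw [hc]; exact hck),
      PySem.Dict.items_insert_of_contains L v hck, h, List.map_map, List.map_map]
    apply List.map_congr_left
    intro q hq
    by_cases hqk : q.1 = k
    · simp [Function.comp, hqk, hv]
    · simp [Function.comp, hqk]

lemma pvInv_step (stA : PySem.Dict Int Int × PySem.Dict Int Int × Int)
    (stB : PySem.Dict Int Int × PySem.Dict Int Int × PySem.Dict Int Int × Int)
    (p : Int × Int × Int) (h : pvInv stA stB) : pvInv (pvStepA stA p) (pvStepB stB p) := by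
  obtain ⟨G, S, i⟩ := stA
  obtain ⟨P, L, S2, i2⟩ := stB
  obtain ⟨a, b, c⟩ := p
  unfold pvInv at h
  dsimp only at h
  obtain ⟨hi2, hS2, hi0, hkeys, hwf, hLval, hLnd, hGL⟩ := h
  subst hi2
  subst hS2
  have hGkeys : G.keys = L.keys := by
    simp only [PySem.Dict.keys, hGL, List.map_map]
    exact List.map_congr_left (fun q _ => rfl)
  have hcontGL : ∀ x, G.contains x = L.contains x := fun x => by
    rw [PySem.Dict.contains_eq_decide_mem_keys, PySem.Dict.contains_eq_decide_mem_keys, hGkeys]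
  have hGnd : G.keys.Nodup := hGkeys ▸ hLnd
  have hsize : P.size = i2.toNat := pv_size_of_keys P i2 hkeys
  have hPcont : ∀ x, P.contains x = true ↔ (0 ≤ x ∧ x < i2) := fun x => by
    rw [PySem.Dict.contains_eq_decide_mem_keys, hkeys]
    simp only [decide_eq_true_eq]
    exact pv_mem_keysOf i2 x hi0
  have hcl : ∀ x, 0 ≤ x → x < i2 → 0 ≤ P.getD x x ∧ P.getD x x < i2 :=
    fun x h1 h2 => (hwf x h1 h2).1
  have hreach : ∀ x, 0 ≤ x → x < i2 → ∃ n, n < i2.toNat ∧ pvRoot P (pvIterN P n x) :=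
    fun x h1 h2 => (hwf x h1 h2).2
  have hF : ∀ v, 0 ≤ v → v < i2 →
      pvRoot P (pvFind P P.size v) ∧ 0 ≤ pvFind P P.size v ∧ pvFind P P.size v < i2 := by
    intro v h1 h2
    obtain ⟨n, hn, hr⟩ := hreach v h1 h2
    have he : pvFind P P.size v = pvIterN P n v :=
      pvFind_eq_of_reach P n P.size v _ rfl hr (by omega)
    rw [he]
    exact ⟨hr, pvIterN_mem P i2 hcl n v ⟨h1, h2⟩⟩
  have hlook : ∀ x, L.contains x = true →
      G.getD x 0 = pvFind P P.size (L.getD x 0) ∧ 0 ≤ L.getD x 0 ∧ L.getD x 0 < i2 := by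
    intro x hx
    have hx' : (L.get? x).isSome := by
      rw [← PySem.Dict.contains_eq_isSome_get?]; exact hx
    obtain ⟨v, hv⟩ := Option.isSome_iff_exists.mp hx'
    have hmemL : (x, v) ∈ L.items := by
      apply PySem.Dict.mem_items_of_get?_eq_some
      exact hv
    have hmemG : (x, pvFind P P.size v) ∈ G.items := by
      rw [hGL]
      exact List.mem_map_of_mem hmemL
    have hG : G.get? x = some (pvFind P P.size v) := by
      apply PySem.Dict.get?_of_mem_items <;> first | exact hmemG | exact hGnd
    have e1 : G.getD x 0 = pvFind P P.size v := by
      rw [PySem.Dict.getD_eq_get?_getD, hG]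
      rfl
    have e2 : L.getD x 0 = v := by
      rw [PySem.Dict.getD_eq_get?_getD, hv]
      rfl
    rw [e1, e2]
    exact ⟨rfl, hLval (x, v) hmemL⟩
  unfold pvStepA pvStepB
  dsimp only
  simp only [hcontGL]
  cases hca : L.contains a with
  | false =>
    cases hcb : L.contains b with
    | false =>
      -- branch 1: both fresh
      simp only [hca, hcb, Bool.false_eq_true, eq_self_iff_true, true_and, and_true,
        false_and, and_false, if_true, if_false, not_false_iff]
      have hPi : P.contains i2 = false := by
        cases hq : P.contains i2
        · rfl
        · exact absurd ((hPcont i2).mp hq) (by omega)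
      have hkeys' : (P.insert i2 i2).keys = pvKeysOf (i2 + 1) := by
        rw [PySem.Dict.keys_insert_of_not_contains P i2 hPi, hkeys]
        unfold pvKeysOf
        have ht : (i2 + 1).toNat = i2.toNat + 1 := by omega
        rw [ht, List.range_succ, List.map_append]
        simp [Int.toNat_of_nonneg hi0]
      have hsize' : (P.insert i2 i2).size = i2.toNat + 1 := by
        have := pv_size_of_keys (P.insert i2 i2) (i2 + 1) hkeys'
        omega
      unfold pvInv
      dsimp only
      refine ⟨rfl, rfl, by omega, hkeys', ?_, ?_, ?_, ?_⟩
      · intro g hg0 hg1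
        by_cases hgi : g < i2
        · constructor
          · rw [PySem.Dict.getD_insert]
            simp only [show g ≠ i2 by omega, if_false]
            have := hcl g hg0 hgi
            omega
          · exact (pv_fresh_find P i2 hcl hreach g hg0 hgi).1
        · have hge : g = i2 := by omega
          subst hge
          constructor
          · rw [PySem.Dict.getD_insert_self]
            omega
          · refine ⟨0, by omega, ?_⟩
            show pvRoot (P.insert g g) g
            unfold pvRoot
            rw [PySem.Dict.getD_insert_self]
      · intro q hq
        rw [PySem.Dict.mem_items_insert] at hq
        rcases hq with hq1 | ⟨hq1, -⟩
        · subst hq1; constructor <;> simp <;> omega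
        · rw [PySem.Dict.mem_items_insert] at hq1
          rcases hq1 with hq2 | ⟨hq2, -⟩
          · subst hq2; constructor <;> simp <;> omega
          · have := hLval q hq2
            constructor <;> omega
      · exact PySem.Dict.nodup_keys_insert _ _ _ (PySem.Dict.nodup_keys_insert _ _ _ hLnd)
      · have hGL' : G.items = L.items.map
            (fun q => (q.1, pvFind (P.insert i2 i2) ((P.insert i2 i2).size) q.2)) := by
          rw [hGL]
          apply List.map_congr_left
          intro q hq
          obtain ⟨h1, h2⟩ := hLval q hq
          have hfr := (pv_fresh_find P i2 hcl hreach q.2 h1 h2).2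
          rw [hsize, hsize', hfr]
        have hFi : pvFind (P.insert i2 i2) ((P.insert i2 i2).size) i2 = i2 := by
          apply pvFind_of_root
          unfold pvRoot
          rw [PySem.Dict.getD_insert_self]
        exact pv_items_map_insert _ _ _ b i2 i2
          (pv_items_map_insert _ _ _ a i2 i2 hGL' hFi.symm) hFi.symm
    | true =>
      -- branch 3: a fresh, b known
      simp only [hca, hcb, Bool.false_eq_true, Bool.true_eq_false, eq_self_iff_true, true_and,
        and_true, false_and, and_false, if_true, if_false, not_false_iff]
      obtain ⟨hvb, hb0, hb1⟩ := hlook b hcb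
      have hroot := hF (L.getD b 0) hb0 hb1
      unfold pvInv
      dsimp only
      refine ⟨rfl, by rw [hvb], hi0, hkeys, hwf, ?_, PySem.Dict.nodup_keys_insert _ _ _ hLnd, ?_⟩
      · intro q hq
        rw [PySem.Dict.mem_items_insert] at hq
        rcases hq with hq1 | ⟨hq1, -⟩
        · subst hq1
          exact ⟨hroot.2.1, hroot.2.2⟩
        · exact hLval q hq1
      · apply pv_items_map_insert _ _ _ a _ _ hGL
        rw [hvb]
        exact (pvFind_of_root P P.size _ hroot.1).symm
  | true =>
    cases hcb : L.contains b with
    | false =>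
      -- branch 2: a known, b fresh
      simp only [hca, hcb, Bool.false_eq_true, Bool.true_eq_false, eq_self_iff_true, true_and,
        and_true, false_and, and_false, if_true, if_false, not_false_iff]
      obtain ⟨hva, ha0, ha1⟩ := hlook a hca
      have hroot := hF (L.getD a 0) ha0 ha1
      unfold pvInv
      dsimp only
      refine ⟨rfl, by rw [hva], hi0, hkeys, hwf, ?_, PySem.Dict.nodup_keys_insert _ _ _ hLnd, ?_⟩
      · intro q hq
        rw [PySem.Dict.mem_items_insert] at hq
        rcases hq with hq1 | ⟨hq1, -⟩
        · subst hq1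
          exact ⟨hroot.2.1, hroot.2.2⟩
        · exact hLval q hq1
      · apply pv_items_map_insert _ _ _ b _ _ hGL
        rw [hva]
        exact (pvFind_of_root P P.size _ hroot.1).symm
    | true =>
      -- branch 4: both known — possible merge
      simp only [hca, hcb, Bool.true_eq_false, eq_self_iff_true, true_and, and_true,
        false_and, and_false, if_true, if_false, not_false_iff]
      obtain ⟨hva, ha0, ha1⟩ := hlook a hca
      obtain ⟨hvb, hb0, hb1⟩ := hlook b hcb
      rw [hva, hvb]
      have hrga := hF (L.getD a 0) ha0 ha1
      have hrgb := hF (L.getD b 0) hb0 hb1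
      by_cases heq : pvFind P P.size (L.getD a 0) = pvFind P P.size (L.getD b 0)
      · rw [if_neg (not_not_intro heq), if_pos heq]
        exact ⟨rfl, rfl, hi0, hkeys, hwf, hLval, hLnd, hGL⟩
      · rw [if_pos heq, if_neg heq]
        set ga := pvFind P P.size (L.getD a 0) with hgadef
        set gb := pvFind P P.size (L.getD b 0) with hgbdef
        have hkeys' : (P.insert gb ga).keys = pvKeysOf i2 := by
          rw [PySem.Dict.keys_insert_of_contains P ga ((hPcont gb).mpr ⟨hrgb.2.1, hrgb.2.2⟩)]
          exact hkeys
        have hsize' : (P.insert gb ga).size = i2.toNat := pv_size_of_keys _ _ hkeys'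
        have hmerge := fun v hv0 hv1 => pv_merge_find P i2 ga gb hcl
          (fun x h1 h2 => hreach x h1 h2) hrga.1 hrgb.1 heq ⟨hrga.2.1, hrga.2.2⟩ v hv0 hv1
        unfold pvInv
        dsimp only
        refine ⟨rfl, rfl, hi0, hkeys', ?_, hLval, hLnd, ?_⟩
        · intro g hg0 hg1
          constructor
          · rw [PySem.Dict.getD_insert]
            by_cases hggb : g = gb
            · simp only [hggb, if_true, eq_self_iff_true]
              exact ⟨hrga.2.1, hrga.2.2⟩
            · simp only [hggb, if_false]
              exact hcl g hg0 hg1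
          · exact (hmerge g hg0 hg1).1
        · show (PySem.Dict.mk _).items = _
          have hmk : (PySem.Dict.mk (G.items.map
              (fun q => if q.2 = gb then (q.1, ga) else q))).items =
              G.items.map (fun q => if q.2 = gb then (q.1, ga) else q) := rfl
          rw [hmk, hGL, List.map_map]
          apply List.map_congr_left
          intro q hq
          obtain ⟨h1, h2⟩ := hLval q hq
          have hm := (hmerge q.2 h1 h2).2
          simp only [Function.comp, hsize, hsize']
          rw [hm]
          by_cases hc : pvFind P i2.toNat q.2 = gb
          · simp [hc]
          · simp [hc]

lemma pvInv_foldl (l : List (Int × Int × Int))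
    (stA : PySem.Dict Int Int × PySem.Dict Int Int × Int)
    (stB : PySem.Dict Int Int × PySem.Dict Int Int × PySem.Dict Int Int × Int)
    (h : pvInv stA stB) : pvInv (l.foldl pvStepA stA) (l.foldl pvStepB stB) := by
  induction l generalizing stA stB with
  | nil => exact h
  | cons p t ih => exact ih _ _ (pvInv_step _ _ p h)

lemma pvInv_init : pvInv (PySem.Dict.empty, PySem.Dict.empty, (0 : Int))
    (PySem.Dict.empty, PySem.Dict.empty, PySem.Dict.empty, (0 : Int)) := by
  unfold pvInv
  dsimp only
  refine ⟨rfl, rfl, le_refl 0, ?_, ?_, ?_, ?_, rfl⟩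
  · simp [pvKeysOf, PySem.Dict.keys, PySem.Dict.empty]
  · intro g h1 h2
    omega
  · intro q hq
    simp [PySem.Dict.empty] at hq
  · simp [PySem.Dict.keys, PySem.Dict.empty]

-- ===== VERDICT (by name: the statement is the Claim_ definition above) =====
theorem build_cloneGroups_spec : Claim_equal_build_cloneGroups := by
  intro clone_pairs _
  unfold Spec_build_cloneGroups build_cloneGroups build_cloneGroups_alt
  have h := pvInv_foldl clone_pairs (PySem.Dict.empty, PySem.Dict.empty, 0)
    (PySem.Dict.empty, PySem.Dict.empty, PySem.Dict.empty, 0) pvInv_init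
  unfold pvInv at h
  obtain ⟨-, h2, -, -, -, -, -, h8⟩ := h
  dsimp only
  rw [Prod.ext_iff]
  exact ⟨h8, by rw [h2]⟩
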